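-- pv_equiv track=rewrite | github.com/fedotovdmitriy14/python_tasks | uncollapse_digits.py | uncollapse
-- ===== SOURCE A (Python) =====
-- def uncollapse(digits):
--     digit_list = ['zero', 'one', 'two', 'three', 'four',
--                   'five', 'six', 'seven', 'eight', 'nine']
--
--     word = ''
--     result = []
--     for i in digits:
--         word += i
--         if len(word) >= 3:
--             if word in digit_list:
--                 result.append(word)
--                 word = ''
--
--     return " ".join(result)
-- ===== SOURCE B (Python) =====
-- def uncollapse(digits):
--     words = {'zero', 'one', 'two', 'three', 'four',
--              'five', 'six', 'seven', 'eight', 'nine'}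
--     result = []
--     pos = 0
--     n = len(digits)
--     while pos < n:
--         for k in (3, 4, 5):
--             w = digits[pos:pos + k]
--             if w in words:
--                 result.append(w)
--                 pos += k
--                 break
--         else:
--             break
--     return " ".join(result)
-- ===== Notes on version B (the rewrite author's own statement) =====
-- stated objective: faster
-- what changed: B replaces A's growing character buffer (appending one char at a time and membership-testing every prefix of length>=3 over the whole input) by an index-based tokenizer that probes the fixed-length slices digits[pos:pos+3..5] against a hash set, jumps by the matched word's length, and breaks at the first boundary with no match instead of scanning the rest.
import Mathlib
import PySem

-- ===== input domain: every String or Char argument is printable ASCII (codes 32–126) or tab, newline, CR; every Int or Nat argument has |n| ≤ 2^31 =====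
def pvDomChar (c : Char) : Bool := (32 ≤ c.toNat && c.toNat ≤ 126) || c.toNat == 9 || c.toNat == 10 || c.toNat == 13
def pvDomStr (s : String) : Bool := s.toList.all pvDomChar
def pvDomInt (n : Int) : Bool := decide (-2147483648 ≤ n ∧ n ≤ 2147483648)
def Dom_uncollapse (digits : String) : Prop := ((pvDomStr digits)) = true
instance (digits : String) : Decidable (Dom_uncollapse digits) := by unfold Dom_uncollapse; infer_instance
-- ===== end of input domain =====

-- B replaces A's growing character buffer by an index-based tokenizer probing the
-- fixed-length slices of length 3, 4, 5 at the current position and jumping by the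
-- matched word's length, stopping at the first boundary with no match (objective: alternative).

-- the ten digit words, as lists of characters (shared constant data of both ports)
def pvDigitWords : List (List Char) :=
  ["zero", "one", "two", "three", "four", "five", "six", "seven", "eight", "nine"].map String.toList

-- ===== PORT A =====
-- A's loop: word buffer grows one char at a time; when len(word) >= 3 and word is a
-- digit word, it is appended to result and the buffer reset.
def uncollapseLoop (word : List Char) (result : List (List Char)) : List Char → List (List Char)
  | [] => result
  | c :: rest =>
    let w := word ++ [c]
    if 3 ≤ w.length then
      if w ∈ pvDigitWords then uncollapseLoop [] (result ++ [w]) rest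
      else uncollapseLoop w result rest
    else uncollapseLoop w result rest

def uncollapse (digits : String) : String :=
  PySem.Str.join " " ((uncollapseLoop [] [] digits.toList).map String.ofList)

-- ===== PORT B =====
-- B's tokenizer: while input remains, probe the slices of length 3, 4, 5 at the current
-- position (cs.take k = digits[pos:pos+k]); on the first member of the word set emit it
-- and jump by its length, otherwise stop.
def uncollapseTok (cs : List Char) : List (List Char) :=
  if h : cs = [] then []
  else if cs.take 3 ∈ pvDigitWords then cs.take 3 :: uncollapseTok (cs.drop 3)
  else if cs.take 4 ∈ pvDigitWords then cs.take 4 :: uncollapseTok (cs.drop 4)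
  else if cs.take 5 ∈ pvDigitWords then cs.take 5 :: uncollapseTok (cs.drop 5)
  else []
termination_by cs.length
decreasing_by
  all_goals
    simp only [List.length_drop]
    have := List.length_pos_of_ne_nil h
    omega

def uncollapse_alt (digits : String) : String :=
  PySem.Str.join " " ((uncollapseTok digits.toList).map String.ofList)

-- ===== PRECONDITION & SPEC =====
def Spec_uncollapse (digits : String) (out : String) : Prop := out = uncollapse_alt digits
instance (digits : String) (out : String) : Decidable (Spec_uncollapse digits out) := by unfold Spec_uncollapse; infer_instance

-- ===== CLAIM (what is proved, stated in full; the proofs are below) =====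
def Claim_equal_uncollapse : Prop := ∀ (digits : String), Dom_uncollapse digits → Spec_uncollapse digits (uncollapse digits)

-- ===== LEMMAS AND PROOFS =====

lemma mem_words_len {w : List Char} (h : w ∈ pvDigitWords) : 3 ≤ w.length ∧ w.length ≤ 5 := by
  simp only [pvDigitWords, List.map, List.mem_cons, List.not_mem_nil, or_false] at h
  rcases h with rfl | rfl | rfl | rfl | rfl | rfl | rfl | rfl | rfl | rfl <;> decide

-- once the buffer has length ≥ 5, every later buffer has length ≥ 6 and can never match
lemma loop_big (cs : List Char) : ∀ (word : List Char) (result : List (List Char)),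
    5 ≤ word.length → uncollapseLoop word result cs = result := by
  induction cs with
  | nil => intro word result _; rfl
  | cons c rest ih =>
    intro word result h5
    have hlen : 3 ≤ (word ++ [c]).length := by simp; omega
    have hnm : (word ++ [c]) ∉ pvDigitWords := by
      intro hm
      have := (mem_words_len hm).2
      simp at this; omega
    simp only [uncollapseLoop, if_pos hlen, if_neg hnm]
    exact ih _ _ (by simp; omega)

lemma short_not_mem {l : List Char} (h : l.length ≤ 2) : l ∉ pvDigitWords := by
  intro hm; have := (mem_words_len hm).1; omega

lemma loop_eq_tok : ∀ (n : ℕ) (cs : List Char), cs.length ≤ n →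
    ∀ (result : List (List Char)),
      uncollapseLoop [] result cs = result ++ uncollapseTok cs := by
  intro n
  induction n with
  | zero =>
    intro cs hcs result
    have : cs = [] := List.eq_nil_of_length_eq_zero (by omega)
    subst this
    simp [uncollapseLoop, uncollapseTok]
  | succ n ih =>
    intro cs hcs result
    match cs with
    | [] => simp [uncollapseLoop, uncollapseTok]
    | [a] =>
      rw [uncollapseTok]
      simp [uncollapseLoop, short_not_mem (l := [a]) (by simp)]
    | [a, b] =>
      rw [uncollapseTok]
      have h2 := short_not_mem (l := [a, b]) (by simp)
      have h2' := short_not_mem (l := [a, b]) (by simp)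
      simp [uncollapseLoop, h2']
    | a :: b :: c :: rest =>
      rw [uncollapseTok]
      simp only [uncollapseLoop]
      norm_num
      rw [if_neg (show ¬(a :: b :: c :: rest = []) by simp)]
      by_cases hm3 : ([a, b, c] : List Char) ∈ pvDigitWords
      · rw [if_pos hm3, if_pos hm3, ih rest (by simp at hcs ⊢; omega)]
        simp
      · rw [if_neg hm3, if_neg hm3]
        match rest with
        | [] => simp [uncollapseLoop, List.take, hm3]
        | d :: rest2 =>
          simp only [uncollapseLoop]
          norm_num
          by_cases hm4 : ([a, b, c, d] : List Char) ∈ pvDigitWords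
          · rw [if_pos hm4, ih rest2 (by simp at hcs ⊢; omega)]
            simp [hm4]
          · rw [if_neg hm4]
            match rest2 with
            | [] => simp [uncollapseLoop, hm4]
            | e :: rest3 =>
              simp only [uncollapseLoop, List.take_succ_cons, List.take_zero]
              norm_num
              by_cases hm5 : ([a, b, c, d, e] : List Char) ∈ pvDigitWords
              · rw [if_pos hm5, if_pos hm5, ih rest3 (by simp at hcs ⊢; omega)] <;>
                  simp [hm4]
              · rw [if_neg hm5, if_neg hm5, loop_big rest3 _ result (by simp)] <;>
                  simp [hm4]

-- ===== VERDICT (by name: the statement is the Claim_ definition above) =====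
theorem uncollapse_spec : Claim_equal_uncollapse := by
  intro digits _
  unfold Spec_uncollapse uncollapse uncollapse_alt
  rw [loop_eq_tok digits.toList.length digits.toList le_rfl []]
  rfl
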